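-- pv_equiv track=rewrite | github.com/DaveCBeck/thala | workflows/supervised_lit_review/supervision/loops/loop3/section_rewriter.py | extract_section_with_context
-- ===== SOURCE A (Python) =====
-- CONTEXT_PARAGRAPHS = 3
--
-- def extract_section_with_context(
--     paragraph_mapping: dict[int, str],
--     affected_paragraphs: list[int],
--     context_size: int = CONTEXT_PARAGRAPHS,
-- ) -> tuple[str, str, str, int, int]:
--     """Extract section content with surrounding context.
--
--     Args:
--         paragraph_mapping: {paragraph_num: text} mapping
--         affected_paragraphs: List of paragraph numbers to rewrite
--         context_size: Number of paragraphs before/after to include as context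
--
--     Returns:
--         Tuple of (context_before, section_content, context_after, start_para, end_para)
--     """
--     if not affected_paragraphs:
--         return "", "", "", 0, 0
--
--     # Get the range of paragraphs to extract
--     start_para = min(affected_paragraphs)
--     end_para = max(affected_paragraphs)
--
--     # Get all paragraph numbers in order
--     all_para_nums = sorted(paragraph_mapping.keys())
--     if not all_para_nums:
--         return "", "", "", start_para, end_para
--
--     min_para = min(all_para_nums)
--     max_para = max(all_para_nums)
--
--     # Extract context before
--     context_start = max(min_para, start_para - context_size)
--     context_before_paras = []
--     for p in range(context_start, start_para):
--         if p in paragraph_mapping: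
--             context_before_paras.append(paragraph_mapping[p])
--     context_before = "\n\n".join(context_before_paras)
--
--     # Extract the section to rewrite
--     section_paras = []
--     for p in range(start_para, end_para + 1):
--         if p in paragraph_mapping:
--             section_paras.append(paragraph_mapping[p])
--     section_content = "\n\n".join(section_paras)
--
--     # Extract context after
--     context_end = min(max_para, end_para + context_size)
--     context_after_paras = []
--     for p in range(end_para + 1, context_end + 1):
--         if p in paragraph_mapping:
--             context_after_paras.append(paragraph_mapping[p])
--     context_after = "\n\n".join(context_after_paras)
--
--     return context_before, section_content, context_after, start_para, end_para
-- ===== SOURCE B (Python) =====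
-- CONTEXT_PARAGRAPHS = 3
--
-- def extract_section_with_context(
--     paragraph_mapping: dict[int, str],
--     affected_paragraphs: list[int],
--     context_size: int = CONTEXT_PARAGRAPHS,
-- ) -> tuple[str, str, str, int, int]:
--     """Single filtering pass over the sorted keys instead of three range scans."""
--     if not affected_paragraphs:
--         return "", "", "", 0, 0
--     start_para = min(affected_paragraphs)
--     end_para = max(affected_paragraphs)
--     if not paragraph_mapping:
--         return "", "", "", start_para, end_para
--     before, section, after = [], [], []
--     for num, text in sorted(paragraph_mapping.items(), key=lambda kv: kv[0]):
--         if start_para - context_size <= num < start_para: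
--             before.append(text)
--         elif start_para <= num <= end_para:
--             section.append(text)
--         elif end_para < num <= end_para + context_size:
--             after.append(text)
--     return "\n\n".join(before), "\n\n".join(section), "\n\n".join(after), start_para, end_para
-- ===== Notes on version B (the rewrite author's own statement) =====
-- stated objective: alternative
-- what changed: B replaces A's three range(..) scans with per-index membership tests and dict lookups by a single classifying pass over the sorted dict items that appends each paragraph to one of three lists, which are then joined.
import Mathlib
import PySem

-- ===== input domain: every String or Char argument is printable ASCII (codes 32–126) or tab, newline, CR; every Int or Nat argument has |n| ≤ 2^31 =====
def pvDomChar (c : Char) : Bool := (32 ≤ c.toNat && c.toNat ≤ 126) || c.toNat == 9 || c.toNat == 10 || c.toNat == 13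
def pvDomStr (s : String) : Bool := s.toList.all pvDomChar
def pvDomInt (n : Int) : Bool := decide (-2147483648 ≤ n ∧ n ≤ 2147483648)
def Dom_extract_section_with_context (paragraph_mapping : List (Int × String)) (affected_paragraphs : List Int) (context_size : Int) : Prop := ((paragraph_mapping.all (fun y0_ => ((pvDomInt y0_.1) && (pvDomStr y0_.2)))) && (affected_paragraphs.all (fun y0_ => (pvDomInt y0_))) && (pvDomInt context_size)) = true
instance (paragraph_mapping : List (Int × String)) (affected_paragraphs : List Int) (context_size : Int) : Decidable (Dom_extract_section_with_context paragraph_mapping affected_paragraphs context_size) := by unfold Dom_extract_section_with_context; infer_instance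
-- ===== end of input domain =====

-- B replaces A's three range-scans-with-membership-tests by one classifying pass over the
-- sorted dict items; equivalence is proved for every input (no precondition).

-- ===== PORT A =====
def extract_section_with_context (paragraph_mapping : List (Int × String)) (affected_paragraphs : List Int) (context_size : Int) : String × String × String × Int × Int :=
  if affected_paragraphs = [] then ("", "", "", 0, 0) else
  let start_para := (PySem.List.min? affected_paragraphs (fun x => x)).getD 0
  let end_para := (PySem.List.max? affected_paragraphs (fun x => x)).getD 0
  let d := PySem.Dict.ofList paragraph_mapping
  let all_para_nums := PySem.List.sorted d.keys (fun x => x) false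
  if all_para_nums = [] then ("", "", "", start_para, end_para) else
  let min_para := (PySem.List.min? all_para_nums (fun x => x)).getD 0
  let max_para := (PySem.List.max? all_para_nums (fun x => x)).getD 0
  let context_start := max min_para (start_para - context_size)
  let context_before_paras := (PySem.List.pyRange context_start start_para 1).foldl
    (fun acc p => if d.contains p then acc ++ [d.getD p ""] else acc) []
  let context_before := PySem.Str.join "\n\n" context_before_paras
  let section_paras := (PySem.List.pyRange start_para (end_para + 1) 1).foldl
    (fun acc p => if d.contains p then acc ++ [d.getD p ""] else acc) []
  let section_content := PySem.Str.join "\n\n" section_paras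
  let context_end := min max_para (end_para + context_size)
  let context_after_paras := (PySem.List.pyRange (end_para + 1) (context_end + 1) 1).foldl
    (fun acc p => if d.contains p then acc ++ [d.getD p ""] else acc) []
  let context_after := PySem.Str.join "\n\n" context_after_paras
  (context_before, section_content, context_after, start_para, end_para)

-- ===== PORT B =====
def extract_section_with_context_alt (paragraph_mapping : List (Int × String)) (affected_paragraphs : List Int) (context_size : Int) : String × String × String × Int × Int :=
  if affected_paragraphs = [] then ("", "", "", 0, 0) else
  let start_para := (PySem.List.min? affected_paragraphs (fun x => x)).getD 0
  let end_para := (PySem.List.max? affected_paragraphs (fun x => x)).getD 0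
  let d := PySem.Dict.ofList paragraph_mapping
  if d.items = [] then ("", "", "", start_para, end_para) else
  let tri := (PySem.List.sorted d.items (fun kv => kv.1) false).foldl
    (fun (acc : List String × List String × List String) kv =>
      if start_para - context_size ≤ kv.1 ∧ kv.1 < start_para then (acc.1 ++ [kv.2], acc.2.1, acc.2.2)
      else if start_para ≤ kv.1 ∧ kv.1 ≤ end_para then (acc.1, acc.2.1 ++ [kv.2], acc.2.2)
      else if end_para < kv.1 ∧ kv.1 ≤ end_para + context_size then (acc.1, acc.2.1, acc.2.2 ++ [kv.2])
      else acc) ([], [], [])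
  (PySem.Str.join "\n\n" tri.1, PySem.Str.join "\n\n" tri.2.1, PySem.Str.join "\n\n" tri.2.2, start_para, end_para)

-- ===== PRECONDITION & SPEC =====
def Spec_extract_section_with_context (paragraph_mapping : List (Int × String)) (affected_paragraphs : List Int) (context_size : Int) (out : String × String × String × Int × Int) : Prop := out = extract_section_with_context_alt paragraph_mapping affected_paragraphs context_size
instance (paragraph_mapping : List (Int × String)) (affected_paragraphs : List Int) (context_size : Int) (out : String × String × String × Int × Int) : Decidable (Spec_extract_section_with_context paragraph_mapping affected_paragraphs context_size out) := by unfold Spec_extract_section_with_context; infer_instance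

-- ===== CLAIM (what is proved, stated in full; the proofs are below) =====
def Claim_equal_extract_section_with_context : Prop := ∀ (paragraph_mapping : List (Int × String)) (affected_paragraphs : List Int) (context_size : Int), Dom_extract_section_with_context paragraph_mapping affected_paragraphs context_size → Spec_extract_section_with_context paragraph_mapping affected_paragraphs context_size (extract_section_with_context paragraph_mapping affected_paragraphs context_size)

-- ===== LEMMAS AND PROOFS =====

-- B's three-accumulator classifying fold, described by three (elif-style) filters.
theorem tri_foldl (s e c : Int) (l : List (Int × String)) (acc : List String × List String × List String) :
    l.foldl (fun (acc : List String × List String × List String) kv =>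
      if s - c ≤ kv.1 ∧ kv.1 < s then (acc.1 ++ [kv.2], acc.2.1, acc.2.2)
      else if s ≤ kv.1 ∧ kv.1 ≤ e then (acc.1, acc.2.1 ++ [kv.2], acc.2.2)
      else if e < kv.1 ∧ kv.1 ≤ e + c then (acc.1, acc.2.1, acc.2.2 ++ [kv.2])
      else acc) acc
    = (acc.1 ++ (l.filter (fun kv => decide (s - c ≤ kv.1 ∧ kv.1 < s))).map (·.2),
       acc.2.1 ++ (l.filter (fun kv => decide (¬(s - c ≤ kv.1 ∧ kv.1 < s) ∧ s ≤ kv.1 ∧ kv.1 ≤ e))).map (·.2),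
       acc.2.2 ++ (l.filter (fun kv => decide (¬(s - c ≤ kv.1 ∧ kv.1 < s) ∧ ¬(s ≤ kv.1 ∧ kv.1 ≤ e) ∧ e < kv.1 ∧ kv.1 ≤ e + c))).map (·.2)) := by
  induction l generalizing acc with
  | nil => simp
  | cons kv t ih =>
    simp only [List.foldl_cons, List.filter_cons]
    by_cases h1 : s - c ≤ kv.1 ∧ kv.1 < s
    · rw [if_pos h1, ih]
      simp
      try split_ifs <;> first | (exfalso; omega) | simp
    · rw [if_neg h1]
      by_cases h2 : s ≤ kv.1 ∧ kv.1 ≤ e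
      · rw [if_pos h2, ih]
        simp
        try split_ifs <;> first | (exfalso; omega) | simp
      · rw [if_neg h2]
        by_cases h3 : e < kv.1 ∧ kv.1 ≤ e + c
        · rw [if_pos h3, ih]
          simp
          try split_ifs <;> first | (exfalso; omega) | simp
        · rw [if_neg h3, ih]
          simp
          try split_ifs <;> first | (exfalso; omega) | simp

-- A's guarded range-scan over the dict equals the window filter of the key-sorted items.
theorem range_window (pm : List (Int × String)) (a b : Int) :
    (PySem.List.pyRange a b 1).foldl
      (fun acc p => if (PySem.Dict.ofList pm).contains p then acc ++ [(PySem.Dict.ofList pm).getD p ""] else acc) []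
    = ((PySem.List.sorted (PySem.Dict.ofList pm).items (fun kv => kv.1) false).filter
        (fun kv => decide (a ≤ kv.1 ∧ kv.1 < b))).map (·.2) := by
  set d := PySem.Dict.ofList pm with hd
  set S := PySem.List.sorted d.items (fun kv => kv.1) false with hS
  have hnd : d.keys.Nodup := PySem.Dict.nodup_keys_ofList pm
  have hperm : S.Perm d.items := PySem.List.sorted_perm _ _ _
  have hkeysperm : (S.map (·.1)).Perm d.keys := by
    have h := hperm.map (·.1)
    simpa [PySem.Dict.keys] using h
  have hndS : (S.map (·.1)).Nodup := hkeysperm.nodup_iff.mpr hnd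
  have hlt : S.Pairwise (fun u v => u.1 < v.1) := by
    have hle : S.Pairwise (fun u v => u.1 ≤ v.1) := PySem.List.sorted_pairwise _ _
    have hne : S.Pairwise (fun u v => u.1 ≠ v.1) := List.pairwise_map.mp hndS
    exact (hle.and hne).imp (fun h => lt_of_le_of_ne h.1 h.2)
  have hkl : (PySem.List.pyRange a b 1).filter (fun p => d.contains p)
      = (S.filter (fun kv => decide (a ≤ kv.1 ∧ kv.1 < b))).map (·.1) := by
    refine List.eq_of_perm_of_sorted (le := fun (x y : Int) => x < y)
      (fun x y _ _ hxy hyx => by omega) ?_ ?_ ?_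
    · exact (PySem.List.pairwise_lt_pyRange_one a b).filter _
    · refine List.pairwise_map.mpr (List.Pairwise.sublist ?_ hlt)
      exact List.filter_sublist
    · have hsub : ((S.filter (fun kv => decide (a ≤ kv.1 ∧ kv.1 < b))).map
          (fun kv : Int × String => kv.1)).Sublist (S.map (fun kv : Int × String => kv.1)) :=
        List.Sublist.map _ List.filter_sublist
      refine (List.perm_ext_iff_of_nodup ((PySem.List.nodup_pyRange_one a b).filter _)
        (hndS.sublist hsub)).mpr ?_
      intro x
      constructor
      · intro hx
        rcases List.mem_filter.mp hx with ⟨hxr, hxc⟩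
        rcases PySem.List.mem_pyRange_one.mp hxr with ⟨hax, hxb⟩
        have hxk : x ∈ d.keys := (PySem.Dict.contains_iff_mem_keys d x).mp hxc
        rcases List.mem_map.mp (hkeysperm.mem_iff.mpr hxk) with ⟨kv, hkvS, hkvx⟩
        exact List.mem_map.mpr ⟨kv, List.mem_filter.mpr ⟨hkvS, by simp [hkvx, hax, hxb]⟩, hkvx⟩
      · intro hx
        rcases List.mem_map.mp hx with ⟨kv, hkvf, hkvx⟩
        rcases List.mem_filter.mp hkvf with ⟨hkvS, hw⟩
        have hw' : a ≤ kv.1 ∧ kv.1 < b := of_decide_eq_true hw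
        refine List.mem_filter.mpr ⟨PySem.List.mem_pyRange_one.mpr ⟨by omega, by omega⟩, ?_⟩
        exact (PySem.Dict.contains_iff_mem_keys d x).mpr
          (hkeysperm.mem_iff.mp (List.mem_map.mpr ⟨kv, hkvS, hkvx⟩))
  rw [PySem.List.foldl_append_if (fun p => d.contains p) (fun p => d.getD p "") _ [], hkl,
    List.nil_append, List.map_map]
  refine List.map_congr_left ?_
  intro kv hkv
  have hkvS : kv ∈ S := (List.mem_filter.mp hkv).1
  have : (kv.1, kv.2) ∈ d.items := hperm.mem_iff.mp (by simpa using hkvS)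
  exact PySem.Dict.getD_of_mem_items d this hnd ""

-- ===== VERDICT (by name: the statement is the Claim_ definition above) =====
theorem extract_section_with_context_spec : Claim_equal_extract_section_with_context := by
  intro pm aff cs _
  unfold Spec_extract_section_with_context
  by_cases haff : aff = []
  · simp [extract_section_with_context, extract_section_with_context_alt, haff]
  · obtain ⟨x, hx⟩ := List.exists_mem_of_ne_nil aff haff
    obtain ⟨s0, hs0⟩ : ∃ s0, PySem.List.min? aff (fun x => x) = some s0 := by
      cases h : PySem.List.min? aff (fun x => x) with
      | none => exact absurd ((PySem.List.min?_eq_none_iff aff _).mp h) haff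
      | some m => exact ⟨m, rfl⟩
    obtain ⟨e0, he0⟩ : ∃ e0, PySem.List.max? aff (fun x => x) = some e0 := by
      cases h : PySem.List.max? aff (fun x => x) with
      | none => exact absurd ((PySem.List.max?_eq_none_iff aff _).mp h) haff
      | some m => exact ⟨m, rfl⟩
    have hse : s0 ≤ e0 :=
      le_trans (PySem.List.min?_isMin hs0 x hx) (PySem.List.max?_isMax he0 x hx)
    simp only [extract_section_with_context, extract_section_with_context_alt,
      if_neg haff, hs0, he0, Option.getD_some]
    have hiff : (PySem.List.sorted (PySem.Dict.ofList pm).keys (fun x => x) false = [])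
        ↔ ((PySem.Dict.ofList pm).items = []) := by
      rw [PySem.List.sorted_eq_nil_iff]
      simp [PySem.Dict.keys]
    by_cases hempty : (PySem.Dict.ofList pm).items = []
    · rw [if_pos (hiff.mpr hempty), if_pos hempty]
    · rw [if_neg (fun h => hempty (hiff.mp h)), if_neg hempty]
      have hperm : (PySem.List.sorted (PySem.Dict.ofList pm).items (fun kv => kv.1) false).Perm
          (PySem.Dict.ofList pm).items := PySem.List.sorted_perm _ _ _
      have hkeysne : PySem.List.sorted (PySem.Dict.ofList pm).keys (fun x => x) false ≠ [] :=
        fun h => hempty (hiff.mp h)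
      obtain ⟨mp, hmp⟩ : ∃ m, PySem.List.min?
          (PySem.List.sorted (PySem.Dict.ofList pm).keys (fun x => x) false) (fun x => x) = some m := by
        cases h : PySem.List.min? (PySem.List.sorted (PySem.Dict.ofList pm).keys (fun x => x) false) (fun x => x) with
        | none => exact absurd ((PySem.List.min?_eq_none_iff _ _).mp h) hkeysne
        | some m => exact ⟨m, rfl⟩
      obtain ⟨mx, hmx⟩ : ∃ m, PySem.List.max?
          (PySem.List.sorted (PySem.Dict.ofList pm).keys (fun x => x) false) (fun x => x) = some m := by
        cases h : PySem.List.max? (PySem.List.sorted (PySem.Dict.ofList pm).keys (fun x => x) false) (fun x => x) with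
        | none => exact absurd ((PySem.List.max?_eq_none_iff _ _).mp h) hkeysne
        | some m => exact ⟨m, rfl⟩
      have hmemkeys : ∀ kv ∈ PySem.List.sorted (PySem.Dict.ofList pm).items (fun kv => kv.1) false,
          kv.1 ∈ PySem.List.sorted (PySem.Dict.ofList pm).keys (fun x => x) false := by
        intro kv hkv
        rw [PySem.List.mem_sorted]
        have hkvi : kv ∈ (PySem.Dict.ofList pm).items := hperm.mem_iff.mp hkv
        simp only [PySem.Dict.keys]
        exact List.mem_map_of_mem (f := fun kv : Int × String => kv.1) hkvi
      have hminS : ∀ kv ∈ PySem.List.sorted (PySem.Dict.ofList pm).items (fun kv => kv.1) false,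
          mp ≤ kv.1 := fun kv hkv => PySem.List.min?_isMin hmp kv.1 (hmemkeys kv hkv)
      have hmaxS : ∀ kv ∈ PySem.List.sorted (PySem.Dict.ofList pm).items (fun kv => kv.1) false,
          kv.1 ≤ mx := fun kv hkv => PySem.List.max?_isMax hmx kv.1 (hmemkeys kv hkv)
      rw [hmp, hmx]
      simp only [Option.getD_some]
      rw [tri_foldl, range_window pm (max mp (s0 - cs)) s0,
        range_window pm s0 (e0 + 1), range_window pm (e0 + 1) (min mx (e0 + cs) + 1)]
      simp only [List.nil_append, Prod.mk.injEq]
      refine ⟨?_, ?_, ?_, trivial⟩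
      · refine congrArg _ (congrArg _ (List.filter_congr ?_))
        intro kv hkv
        have := hminS kv hkv
        simp only [decide_eq_decide]
        omega
      · refine congrArg _ (congrArg _ (List.filter_congr ?_))
        intro kv hkv
        simp only [decide_eq_decide]
        omega
      · refine congrArg _ (congrArg _ (List.filter_congr ?_))
        intro kv hkv
        have := hmaxS kv hkv
        simp only [decide_eq_decide]
        omega
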